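-- pv_equiv track=rewrite | github.com/KafkaWannaFly/Wumpus-Project | Code/Agent.py | common_adj
-- ===== SOURCE A (Python) =====
-- def common_adj(pos_1, pos_2, width, height, visited):
--     k = [(1, 0), (-1, 0), (0, 1), (0, -1)]
--     temp1 = []
--     for x in k:
--         tmp_pos = (pos_1[0] + x[0], pos_1[1] + x[1])
--         if validCell(tmp_pos[0], tmp_pos[1], (width, height)):
--             temp1.append(tmp_pos)
--     temp2 = []
--     for x in k:
--         tmp_pos = (pos_2[0] + x[0], pos_2[1] + x[1])
--         if validCell(tmp_pos[0], tmp_pos[1], (width, height)):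
--             temp2.append(tmp_pos)
--
--     for i in temp1:
--         for j in temp2:
--             if i == j and i not in visited:
--                 return True, i
--
--     return False, None
--
-- def validCell(i, j, shape):
--     return 0 <= i and i < shape[0] and 0 <= j and j < shape[1]
-- ===== SOURCE B (Python) =====
-- def common_adj(pos_1, pos_2, width, height, visited):
--     # single pass over the four offsets; arithmetic adjacency test to pos_2
--     for dx, dy in ((1, 0), (-1, 0), (0, 1), (0, -1)):
--         c = (pos_1[0] + dx, pos_1[1] + dy)
--         if (0 <= c[0] < width and 0 <= c[1] < height
--                 and abs(c[0] - pos_2[0]) + abs(c[1] - pos_2[1]) == 1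
--                 and c not in visited):
--             return True, c
--     return False, None
-- ===== Notes on version B (the rewrite author's own statement) =====
-- stated objective: simpler
-- what changed: B drops both constructed neighbor lists and the nested scan: one pass over the four offsets builds each candidate from pos_1 and tests adjacency to pos_2 arithmetically (Manhattan distance 1) plus validity and non-membership in visited.
import Mathlib
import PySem

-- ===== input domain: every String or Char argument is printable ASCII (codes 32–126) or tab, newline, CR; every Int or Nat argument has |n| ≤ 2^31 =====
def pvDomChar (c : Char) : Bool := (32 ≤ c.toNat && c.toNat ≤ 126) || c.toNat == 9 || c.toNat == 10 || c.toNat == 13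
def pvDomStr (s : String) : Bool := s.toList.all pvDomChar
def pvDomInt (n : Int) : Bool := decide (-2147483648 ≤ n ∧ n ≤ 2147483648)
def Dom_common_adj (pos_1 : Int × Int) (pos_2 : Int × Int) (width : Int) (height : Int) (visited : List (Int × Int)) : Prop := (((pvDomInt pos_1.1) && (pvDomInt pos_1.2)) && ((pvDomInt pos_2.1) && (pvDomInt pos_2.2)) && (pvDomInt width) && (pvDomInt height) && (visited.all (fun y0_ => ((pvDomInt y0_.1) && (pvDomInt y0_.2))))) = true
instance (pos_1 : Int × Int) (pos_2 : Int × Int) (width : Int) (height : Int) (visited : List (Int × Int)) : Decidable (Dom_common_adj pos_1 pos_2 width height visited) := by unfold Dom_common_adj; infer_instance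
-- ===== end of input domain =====

-- B replaces A's two constructed neighbor lists and nested scan by one pass over
-- the four offsets with an arithmetic adjacency test to pos_2 (objective: simpler).

-- ===== PORT A =====
def validCell (i : Int) (j : Int) (shape : Int × Int) : Bool :=
  decide (0 ≤ i) && decide (i < shape.1) && decide (0 ≤ j) && decide (j < shape.2)

-- A's 'for x in k: … temp.append(tmp_pos)' loop (cons-recursion builds the same list)
def buildAdj (pos : Int × Int) (ks : List (Int × Int)) (width height : Int) : List (Int × Int) :=
  match ks with
  | [] => []
  | x :: rest =>
    let tmp_pos := (pos.1 + x.1, pos.2 + x.2)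
    if validCell tmp_pos.1 tmp_pos.2 (width, height) then
      tmp_pos :: buildAdj pos rest width height
    else
      buildAdj pos rest width height

-- A's inner 'for j in temp2' loop: does some j satisfy 'i == j and i not in visited'?
def innerScan (i : Int × Int) (temp2 : List (Int × Int)) (visited : List (Int × Int)) : Bool :=
  match temp2 with
  | [] => false
  | j :: rest => if i = j ∧ i ∉ visited then true else innerScan i rest visited

-- A's outer 'for i in temp1' loop
def outerScan (temp1 : List (Int × Int)) (temp2 : List (Int × Int)) (visited : List (Int × Int)) : Bool × (Option (Int × Int)) :=
  match temp1 with
  | [] => (false, none)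
  | i :: rest => if innerScan i temp2 visited then (true, some i) else outerScan rest temp2 visited

def common_adj (pos_1 : Int × Int) (pos_2 : Int × Int) (width : Int) (height : Int) (visited : List (Int × Int)) : Bool × (Option (Int × Int)) :=
  let k : List (Int × Int) := [(1, 0), (-1, 0), (0, 1), (0, -1)]
  let temp1 := buildAdj pos_1 k width height
  let temp2 := buildAdj pos_2 k width height
  outerScan temp1 temp2 visited

-- ===== PORT B =====
-- B's single loop over the offsets
def altScan (pos_1 : Int × Int) (pos_2 : Int × Int) (width : Int) (height : Int) (visited : List (Int × Int)) (ks : List (Int × Int)) : Bool × (Option (Int × Int)) :=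
  match ks with
  | [] => (false, none)
  | x :: rest =>
    let c := (pos_1.1 + x.1, pos_1.2 + x.2)
    if 0 ≤ c.1 ∧ c.1 < width ∧ 0 ≤ c.2 ∧ c.2 < height ∧
       (c.1 - pos_2.1).natAbs + (c.2 - pos_2.2).natAbs = 1 ∧ c ∉ visited then
      (true, some c)
    else
      altScan pos_1 pos_2 width height visited rest

def common_adj_alt (pos_1 : Int × Int) (pos_2 : Int × Int) (width : Int) (height : Int) (visited : List (Int × Int)) : Bool × (Option (Int × Int)) :=
  altScan pos_1 pos_2 width height visited [(1, 0), (-1, 0), (0, 1), (0, -1)]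

-- ===== PRECONDITION & SPEC =====
def Spec_common_adj (pos_1 : Int × Int) (pos_2 : Int × Int) (width : Int) (height : Int) (visited : List (Int × Int)) (out : Bool × (Option (Int × Int))) : Prop := out = common_adj_alt pos_1 pos_2 width height visited
instance (pos_1 : Int × Int) (pos_2 : Int × Int) (width : Int) (height : Int) (visited : List (Int × Int)) (out : Bool × (Option (Int × Int))) : Decidable (Spec_common_adj pos_1 pos_2 width height visited out) := by unfold Spec_common_adj; infer_instance

-- ===== CLAIM (what is proved, stated in full; the proofs are below) =====
def Claim_equal_common_adj : Prop := ∀ (pos_1 : Int × Int) (pos_2 : Int × Int) (width : Int) (height : Int) (visited : List (Int × Int)), Dom_common_adj pos_1 pos_2 width height visited → Spec_common_adj pos_1 pos_2 width height visited (common_adj pos_1 pos_2 width height visited)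

-- ===== LEMMAS AND PROOFS =====

theorem innerScan_eq_mem (i : Int × Int) (t v : List (Int × Int)) :
    innerScan i t v = true ↔ (i ∈ t ∧ i ∉ v) := by
  induction t with
  | nil => simp [innerScan]
  | cons j rest ih =>
    simp only [innerScan]
    by_cases h : i = j ∧ i ∉ v
    · rw [if_pos h]
      exact ⟨fun _ => ⟨List.mem_cons.mpr (Or.inl h.1), h.2⟩, fun _ => rfl⟩
    · simp only [if_neg h, ih, List.mem_cons]
      constructor
      · rintro ⟨hm, hv⟩; exact ⟨Or.inr hm, hv⟩
      · rintro ⟨hm | hm, hv⟩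
        · exact absurd ⟨hm, hv⟩ h
        · exact ⟨hm, hv⟩

theorem mem_buildAdj (pos : Int × Int) (ks : List (Int × Int)) (w h : Int) (c : Int × Int) :
    c ∈ buildAdj pos ks w h ↔
      ∃ x ∈ ks, validCell (pos.1 + x.1) (pos.2 + x.2) (w, h) = true ∧ c = (pos.1 + x.1, pos.2 + x.2) := by
  induction ks with
  | nil => simp [buildAdj]
  | cons x rest ih =>
    simp only [buildAdj]
    by_cases hv : validCell (pos.1 + x.1) (pos.2 + x.2) (w, h) = true
    · rw [if_pos hv]
      constructor
      · intro hmem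
        rcases List.mem_cons.mp hmem with rfl | hmem
        · exact ⟨x, List.mem_cons_self .., hv, rfl⟩
        · obtain ⟨y, hy, hvy, rfl⟩ := ih.mp hmem
          exact ⟨y, List.mem_cons_of_mem x hy, hvy, rfl⟩
      · rintro ⟨y, hy, hvy, rfl⟩
        rcases List.mem_cons.mp hy with rfl | hy
        · exact List.mem_cons_self ..
        · exact List.mem_cons_of_mem _ (ih.mpr ⟨y, hy, hvy, rfl⟩)
    · rw [if_neg hv, ih]
      constructor
      · rintro ⟨y, hy, hvy, rfl⟩; exact ⟨y, List.mem_cons_of_mem x hy, hvy, rfl⟩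
      · rintro ⟨y, hy, hvy, rfl⟩
        rcases List.mem_cons.mp hy with rfl | hy
        · exact absurd hvy hv
        · exact ⟨y, hy, hvy, rfl⟩

-- membership in A's neighbor list of pos_2 = validity ∧ Manhattan distance 1
theorem mem_temp2_iff (pos_2 : Int × Int) (w h : Int) (c : Int × Int) :
    c ∈ buildAdj pos_2 [(1, 0), (-1, 0), (0, 1), (0, -1)] w h ↔
      (0 ≤ c.1 ∧ c.1 < w ∧ 0 ≤ c.2 ∧ c.2 < h ∧
       (c.1 - pos_2.1).natAbs + (c.2 - pos_2.2).natAbs = 1) := by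
  obtain ⟨a, b⟩ := c
  rw [mem_buildAdj]
  simp only [List.mem_cons, List.not_mem_nil, or_false, validCell, Bool.and_eq_true,
    decide_eq_true_eq, Prod.mk.injEq]
  constructor
  · rintro ⟨x, (rfl | rfl | rfl | rfl), ⟨⟨⟨h1, h2⟩, h3⟩, h4⟩, hc1, hc2⟩ <;>
      exact ⟨by omega, by omega, by omega, by omega, by omega⟩
  · rintro ⟨h1, h2, h3, h4, h5⟩
    have hcase : (a - pos_2.1 = 1 ∧ b - pos_2.2 = 0) ∨
        (a - pos_2.1 = -1 ∧ b - pos_2.2 = 0) ∨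
        (a - pos_2.1 = 0 ∧ b - pos_2.2 = 1) ∨
        (a - pos_2.1 = 0 ∧ b - pos_2.2 = -1) := by omega
    rcases hcase with ⟨e1, e2⟩ | ⟨e1, e2⟩ | ⟨e1, e2⟩ | ⟨e1, e2⟩
    · exact ⟨(1, 0), Or.inl rfl, ⟨⟨⟨by omega, by omega⟩, by omega⟩, by omega⟩, by omega, by omega⟩
    · exact ⟨(-1, 0), Or.inr (Or.inl rfl), ⟨⟨⟨by omega, by omega⟩, by omega⟩, by omega⟩,
        by omega, by omega⟩
    · exact ⟨(0, 1), Or.inr (Or.inr (Or.inl rfl)), ⟨⟨⟨by omega, by omega⟩, by omega⟩, by omega⟩,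
        by omega, by omega⟩
    · exact ⟨(0, -1), Or.inr (Or.inr (Or.inr rfl)), ⟨⟨⟨by omega, by omega⟩, by omega⟩, by omega⟩,
        by omega, by omega⟩

-- the main loop invariant: A's outer scan over the filtered neighbor list of pos_1
-- equals B's single scan over the same offset list, for any temp2 whose membership
-- is 'valid and at Manhattan distance 1 from pos_2'
theorem outerScan_eq_altScan (pos_1 pos_2 : Int × Int) (w h : Int)
    (visited : List (Int × Int)) (t2 : List (Int × Int))
    (ht2 : ∀ c : Int × Int, c ∈ t2 ↔ (0 ≤ c.1 ∧ c.1 < w ∧ 0 ≤ c.2 ∧ c.2 < h ∧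
      (c.1 - pos_2.1).natAbs + (c.2 - pos_2.2).natAbs = 1))
    (ks : List (Int × Int)) :
    outerScan (buildAdj pos_1 ks w h) t2 visited =
      altScan pos_1 pos_2 w h visited ks := by
  induction ks with
  | nil => simp [buildAdj, outerScan, altScan]
  | cons x rest ih =>
    simp only [buildAdj, altScan]
    by_cases hv : validCell (pos_1.1 + x.1) (pos_1.2 + x.2) (w, h) = true
    · rw [if_pos hv]
      simp only [outerScan]
      have hvalid : (0 ≤ pos_1.1 + x.1 ∧ pos_1.1 + x.1 < w ∧
          0 ≤ pos_1.2 + x.2 ∧ pos_1.2 + x.2 < h) := by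
        simpa [validCell, and_assoc] using hv
      by_cases hin : innerScan (pos_1.1 + x.1, pos_1.2 + x.2) t2 visited = true
      · rw [if_pos hin]
        have hm := (innerScan_eq_mem _ _ _).mp hin
        have hd := (ht2 _).mp hm.1
        rw [if_pos ⟨hvalid.1, hvalid.2.1, hvalid.2.2.1, hvalid.2.2.2, hd.2.2.2.2, hm.2⟩]
      · rw [if_neg (by simpa using hin), ih]
        have hnot : ¬ (0 ≤ pos_1.1 + x.1 ∧ pos_1.1 + x.1 < w ∧ 0 ≤ pos_1.2 + x.2 ∧
            pos_1.2 + x.2 < h ∧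
            ((pos_1.1 + x.1) - pos_2.1).natAbs + ((pos_1.2 + x.2) - pos_2.2).natAbs = 1 ∧
            (pos_1.1 + x.1, pos_1.2 + x.2) ∉ visited) := by
          intro hc
          exact hin ((innerScan_eq_mem _ _ _).mpr
            ⟨(ht2 _).mpr ⟨hc.1, hc.2.1, hc.2.2.1, hc.2.2.2.1, hc.2.2.2.2.1⟩, hc.2.2.2.2.2⟩)
        rw [if_neg hnot]
    · rw [if_neg hv, ih]
      have hnot : ¬ (0 ≤ pos_1.1 + x.1 ∧ pos_1.1 + x.1 < w ∧ 0 ≤ pos_1.2 + x.2 ∧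
          pos_1.2 + x.2 < h ∧
          ((pos_1.1 + x.1) - pos_2.1).natAbs + ((pos_1.2 + x.2) - pos_2.2).natAbs = 1 ∧
          (pos_1.1 + x.1, pos_1.2 + x.2) ∉ visited) := by
        intro hc
        exact hv (by simp only [validCell, Bool.and_eq_true, decide_eq_true_eq]
                     exact ⟨⟨⟨hc.1, hc.2.1⟩, hc.2.2.1⟩, hc.2.2.2.1⟩)
      rw [if_neg hnot]

-- ===== VERDICT (by name: the statement is the Claim_ definition above) =====
theorem common_adj_spec : Claim_equal_common_adj := by
  intro pos_1 pos_2 width height visited _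
  unfold Spec_common_adj common_adj common_adj_alt
  exact outerScan_eq_altScan pos_1 pos_2 width height visited _
    (mem_temp2_iff pos_2 width height) _
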